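-- pv_equiv track=rewrite | github.com/blismatic/AdventOfCode-2024 | 09/main.py | find_contiguous_free_space
-- ===== SOURCE A (Python) =====
-- def find_contiguous_free_space(li: list[str], n: int) -> int | None:
--     """Returns the first index of a block of contiguous space of size n. Returns None if not found."""
--     count = 0
--     for i, char in enumerate(li):
--         if char == ".":
--             count += 1
--             if count == n:
--                 return i - n + 1
--         else:
--             count = 0
--     return None
-- ===== SOURCE B (Python) =====
-- def find_contiguous_free_space(li: list[str], n: int) -> int | None:
--     """Returns the first index of a block of contiguous space of size n. Returns None if not found."""
--     if n <= 0 or n > len(li):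
--         return None
--     s = "".join("." if x == "." else "X" for x in li)
--     idx = s.find("." * n)
--     return None if idx == -1 else idx
-- ===== Notes on version B (the rewrite author's own statement) =====
-- stated objective: idiomatic
-- what changed: Replaces the manual enumerate loop with a running count of consecutive '.' by mapping each element to one character and using the built-in substring search s.find('.'*n), with n <= 0 and -1 mapped to None.
import Mathlib
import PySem

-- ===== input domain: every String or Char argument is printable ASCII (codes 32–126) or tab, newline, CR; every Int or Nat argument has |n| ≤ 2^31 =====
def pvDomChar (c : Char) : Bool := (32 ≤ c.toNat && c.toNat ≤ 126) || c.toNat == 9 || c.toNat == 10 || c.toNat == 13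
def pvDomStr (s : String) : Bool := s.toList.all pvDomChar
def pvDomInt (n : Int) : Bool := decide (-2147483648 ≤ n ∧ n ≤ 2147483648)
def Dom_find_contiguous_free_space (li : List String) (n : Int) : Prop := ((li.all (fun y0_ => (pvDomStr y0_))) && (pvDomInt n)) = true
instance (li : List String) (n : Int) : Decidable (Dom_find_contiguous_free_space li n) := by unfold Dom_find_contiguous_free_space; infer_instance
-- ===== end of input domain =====

-- B replaces A's manual running-count scan by a built-in substring search ("."*n) over a
-- one-char-per-element string image of the list (objective: idiomatic; exact equivalence).

-- ===== PORT A =====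
-- the for-loop with its enumerate index i and the running count of consecutive "."
def fcfsGoA : List String → Int → Nat → Nat → Option Int
  | [], _, _, _ => none
  | c :: rest, n, i, count =>
      if c = "." then
        if ((count : Int) + 1) = n then some ((i : Int) - n + 1)
        else fcfsGoA rest n (i + 1) (count + 1)
      else fcfsGoA rest n (i + 1) 0

def find_contiguous_free_space (li : List String) (n : Int) : Option Int :=
  fcfsGoA li n 0 0

-- ===== PORT B =====
-- the image of one list element in the joined string ("." stays ".", anything else is "X")
def fcfsChar (x : String) : Char := if x = "." then '.' else 'X'

def find_contiguous_free_space_alt (li : List String) (n : Int) : Option Int :=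
  if n ≤ 0 ∨ (li.length : Int) < n then none
  else
    let s : List Char := li.map fcfsChar           -- "".join(...) of one-char strings
    let idx : Int := PySem.Chars.find s (List.replicate n.toNat '.')   -- s.find("." * n)
    if idx = -1 then none else some idx

-- ===== PRECONDITION & SPEC =====
def Spec_find_contiguous_free_space (li : List String) (n : Int) (out : Option Int) : Prop := out = find_contiguous_free_space_alt li n
instance (li : List String) (n : Int) (out : Option Int) : Decidable (Spec_find_contiguous_free_space li n out) := by unfold Spec_find_contiguous_free_space; infer_instance

-- ===== CLAIM (what is proved, stated in full; the proofs are below) =====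
def Claim_equal_find_contiguous_free_space : Prop := ∀ (li : List String) (n : Int), Dom_find_contiguous_free_space li n → Spec_find_contiguous_free_space li n (find_contiguous_free_space li n)

-- ===== LEMMAS AND PROOFS =====

-- with n ≤ 0 the count (which is ≥ 0 before the +1) can never equal n, so A returns none
lemma fcfsGoA_nonpos (n : Int) (hn : n ≤ 0) :
    ∀ (rest : List String) (i count : Nat), fcfsGoA rest n i count = none := by
  intro rest
  induction rest with
  | nil => intro i count; rfl
  | cons c rest ih =>
      intro i count
      simp only [fcfsGoA]
      split_ifs
      · omega
      · exact ih _ _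
      · exact ih _ _

-- a prefix of m dots pins every position below m to '.'
lemma repl_prefix_char {m d : Nat} {l : List Char}
    (h : List.replicate m '.' <+: l) (hd : d < m) : l[d]? = some '.' := by
  obtain ⟨t, rfl⟩ := h
  rw [List.getElem?_append_left (by simpa using hd)]
  simp [hd]

-- main invariant: processed input = pre ++ (count dots), no occurrence starts inside pre
lemma fcfsGoA_inv (n : Int) (hn : 1 ≤ n) :
    ∀ (rest : List String) (pre : List Char) (count : Nat),
      (count : Int) < n →
      (∀ j, j < pre.length →
        ¬ (List.replicate n.toNat '.' <+: ((pre ++ List.replicate count '.' ++ rest.map fcfsChar).drop j))) →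
      (match fcfsGoA rest n (pre.length + count) count with
       | some k => ∃ j : Nat, k = (j : Int) ∧
            (List.replicate n.toNat '.' <+: ((pre ++ List.replicate count '.' ++ rest.map fcfsChar).drop j)) ∧
            ∀ i < j, ¬ (List.replicate n.toNat '.' <+: ((pre ++ List.replicate count '.' ++ rest.map fcfsChar).drop i))
       | none => ∀ j, ¬ (List.replicate n.toNat '.' <+: ((pre ++ List.replicate count '.' ++ rest.map fcfsChar).drop j))) := by
  intro rest
  induction rest with
  | nil =>
      intro pre count hc hno
      simp only [fcfsGoA, List.map_nil, List.append_nil]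
      intro j h
      by_cases hj : j < pre.length
      · exact hno j hj (by simpa using h)
      · have hlen := h.length_le
        have : n.toNat ≤ (pre ++ List.replicate count '.').length - j := by
          simpa using hlen
        simp only [List.length_append, List.length_replicate] at this
        omega
  | cons c rest ih =>
      intro pre count hc hno
      simp only [fcfsGoA]
      by_cases hdot : c = "."
      · subst hdot
        rw [if_pos rfl]
        have hmap : (("." : String) :: rest).map fcfsChar = '.' :: rest.map fcfsChar := by
          simp [fcfsChar]
        have heq : (pre ++ List.replicate count '.' ++ (("." : String) :: rest).map fcfsChar)
            = (pre ++ List.replicate (count + 1) '.' ++ rest.map fcfsChar) := by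
          rw [hmap, List.replicate_succ']
          simp [List.append_assoc]
        by_cases hfire : ((count : Int) + 1) = n
        · rw [if_pos hfire]
          refine ⟨pre.length, by omega, ?_, ?_⟩
          · have hnt : n.toNat = count + 1 := by omega
            rw [heq, List.append_assoc, List.drop_append_of_le_length (le_refl _),
                List.drop_length, List.nil_append, hnt]
            exact ⟨rest.map fcfsChar, rfl⟩
          · intro i hi
            exact hno i hi
        · rw [if_neg hfire]
          have hc' : ((count + 1 : Nat) : Int) < n := by push_cast; omega
          have hno' : ∀ j, j < pre.length →
              ¬ (List.replicate n.toNat '.' <+: ((pre ++ List.replicate (count + 1) '.' ++ rest.map fcfsChar).drop j)) := by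
            intro j hj
            rw [← heq]
            exact hno j hj
          have hstep := ih pre (count + 1) hc' hno'
          have hidx : pre.length + (count + 1) = pre.length + count + 1 := by omega
          rw [hidx, ← heq] at hstep
          exact hstep
      · rw [if_neg hdot]
        set pre' : List Char := pre ++ List.replicate count '.' ++ [fcfsChar c] with hpre'
        have hlen' : pre'.length = pre.length + count + 1 := by
          simp [hpre']
          omega
        have heq : (pre' ++ List.replicate 0 '.' ++ rest.map fcfsChar)
            = (pre ++ List.replicate count '.' ++ (c :: rest).map fcfsChar) := by
          simp [hpre', List.append_assoc]
        have hno' : ∀ j, j < pre'.length →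
            ¬ (List.replicate n.toNat '.' <+: ((pre' ++ List.replicate 0 '.' ++ rest.map fcfsChar).drop j)) := by
          intro j hj hpref
          rw [heq] at hpref
          by_cases hj2 : j < pre.length
          · exact hno j hj2 hpref
          · -- the window starting at j covers the non-dot char at position pre.length + count
            rw [hlen'] at hj
            have hd : pre.length + count - j < n.toNat := by omega
            have hch := repl_prefix_char hpref hd
            rw [List.getElem?_drop] at hch
            have hidx : j + (pre.length + count - j) = pre.length + count := by omega
            rw [hidx] at hch
            have hX : (pre ++ List.replicate count '.' ++ (c :: rest).map fcfsChar)[pre.length + count]? = some (fcfsChar c) := by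
              have hl : pre.length + count = (pre ++ List.replicate count '.').length := by simp
              rw [List.map_cons, hl, List.getElem?_append_right (le_refl _)]
              simp
            rw [hX] at hch
            simp only [fcfsChar, if_neg hdot] at hch
            exact absurd (Option.some.inj hch) (by decide)
        have hstep := ih pre' 0 (by omega) hno'
        rw [heq, hlen'] at hstep
        simpa using hstep

-- prefix of a drop is an infix
lemma infix_of_prefix_drop {sub l : List Char} {j : Nat} (h : sub <+: l.drop j) : sub <:+: l :=
  h.isInfix.trans (List.drop_suffix j l).isInfix

lemma main_eq (li : List String) (n : Int) :
    find_contiguous_free_space li n = find_contiguous_free_space_alt li n := by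
  by_cases hn : n ≤ 0
  · simp [find_contiguous_free_space, find_contiguous_free_space_alt, hn,
      fcfsGoA_nonpos n hn]
  · have hn1 : 1 ≤ n := by omega
    have hinv := fcfsGoA_inv n hn1 li [] 0 (by omega) (by intro j hj; simp at hj)
    simp only [List.length_nil, List.replicate_zero, List.nil_append, List.append_nil,
      Nat.add_zero] at hinv
    unfold find_contiguous_free_space find_contiguous_free_space_alt
    by_cases hbig : (li.length : Int) < n
    · rw [if_pos (Or.inr hbig)]
      cases hA : fcfsGoA li n 0 0 with
      | none => rfl
      | some k =>
          rw [hA] at hinv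
          obtain ⟨j, _, hocc, _⟩ := hinv
          have hlen := hocc.length_le
          simp only [List.length_replicate, List.length_drop, List.length_map] at hlen
          omega
    · rw [if_neg (by omega)]
      set cs := li.map fcfsChar with hcs
      set sub := List.replicate n.toNat '.' with hsub
      cases hA : fcfsGoA li n 0 0 with
      | none =>
          rw [hA] at hinv
          have hnin : ¬ (sub <:+: cs) := by
            intro hin
            obtain ⟨j, hj⟩ := (PySem.Chars.exists_prefix_drop_iff_isIn sub cs).2
              ((PySem.Chars.isIn_iff_infix sub cs).2 hin)
            exact hinv j hj
          rw [if_pos ((PySem.Chars.find_eq_neg_one_iff cs sub).2 hnin)]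
      | some k =>
          rw [hA] at hinv
          obtain ⟨j, hk, hocc, hmin⟩ := hinv
          have hin : sub <:+: cs := infix_of_prefix_drop hocc
          have hpos : 0 ≤ PySem.Chars.find cs sub := (PySem.Chars.find_nonneg_iff cs sub).2 hin
          have hspec := PySem.Chars.find_spec hpos
          have hje : (PySem.Chars.find cs sub).toNat = j := by
            rcases lt_trichotomy (PySem.Chars.find cs sub).toNat j with h | h | h
            · exact absurd hspec.1 (hmin _ h)
            · exact h
            · exact absurd hocc (hspec.2 _ h)
          have hne : PySem.Chars.find cs sub ≠ -1 := by omega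
          rw [if_neg hne, hk, ← hje]
          congr 1
          omega

-- ===== VERDICT (by name: the statement is the Claim_ definition above) =====
theorem find_contiguous_free_space_spec : Claim_equal_find_contiguous_free_space := by
  intro li n _
  unfold Spec_find_contiguous_free_space
  exact main_eq li n
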